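-- pv_equiv track=rewrite | github.com/Timmi239/algorithms | B_/845.py | start_cheat
-- ===== SOURCE A (Python) =====
-- def start_cheat(big_part, small_part, changes=0):
--     if sum(big_part) == sum(small_part):
--         return changes
--
--     changes += 1
--     min_number = min(small_part)
--     min_index = small_part.index(min_number)
--     max_number = max(big_part)
--     max_index = big_part.index(max_number)
--
--     if 9 - min_number > max_number:
--         if sum(big_part) - sum(small_part) > 9 - min_number:
--             big_part[max_index] = 0
--             return start_cheat(big_part, small_part, changes)
--         return changes
--
--     else:
--         if sum(big_part) - sum(small_part) > max_number:
--             small_part[min_index] = 9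
--             return start_cheat(big_part, small_part, changes)
--         return changes
-- ===== SOURCE B (Python) =====
-- def start_cheat(big_part, small_part, changes=0):
--     """Count digit changes needed to equalize the two halves' sums.
--
--     Greedy: commit to adjusting whichever side offers the larger single-digit
--     swing, sort the available gains descending, and spend one change per loop
--     iteration -- a full change of the largest remaining gain while the gap
--     exceeds cap, or one final partial change once the gap fits within cap.
--     """
--     diff = sum(big_part) - sum(small_part)
--     if diff == 0:
--         return changes
--     if 9 - min(small_part) > max(big_part):
--         cap = 9 - min(small_part)
--         gains = sorted((x for x in big_part if x > 0), reverse=True)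
--     else:
--         cap = max(big_part)
--         gains = sorted((9 - x for x in small_part if x < 9), reverse=True)
--     i = 0
--     while diff != 0:
--         changes += 1
--         if diff <= cap:
--             diff = 0
--         else:
--             diff -= gains[i]
--             i += 1
--     return changes
-- ===== Notes on version B (the rewrite author's own statement) =====
-- stated objective: alternative
-- what changed: A repeatedly mutates the lists and rescans them (sum/min/max/index per recursive call); B sorts the relevant per-digit gains once in descending order and walks them with a single while loop that counts one change per iteration, and B does not mutate its arguments; Pre_ excludes only inputs where A raises (ValueError on an empty list with unequal sums, RecursionError when the gap exceeds the total available gain).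
import Mathlib
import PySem

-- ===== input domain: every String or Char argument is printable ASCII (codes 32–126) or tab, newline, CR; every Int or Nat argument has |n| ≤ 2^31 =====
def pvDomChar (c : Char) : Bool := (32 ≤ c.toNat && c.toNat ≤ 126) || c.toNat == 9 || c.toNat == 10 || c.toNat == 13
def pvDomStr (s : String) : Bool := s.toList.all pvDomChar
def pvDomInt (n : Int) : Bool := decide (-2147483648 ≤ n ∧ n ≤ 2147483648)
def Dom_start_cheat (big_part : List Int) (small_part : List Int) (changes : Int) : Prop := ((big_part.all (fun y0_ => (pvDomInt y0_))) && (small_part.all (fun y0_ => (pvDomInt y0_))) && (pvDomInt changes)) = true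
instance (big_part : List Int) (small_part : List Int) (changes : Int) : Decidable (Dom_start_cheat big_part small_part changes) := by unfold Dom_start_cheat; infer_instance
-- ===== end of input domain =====

-- B replaces A's repeated rescan-and-mutate recursion by one descending sort of the per-digit
-- gains plus a single linear scan (objective: alternative algorithm); A mutates its list
-- arguments in place, B does not, and the equivalence proved here is about the return value only.

-- ===== PORT A =====
-- A is recursive; the Nat fuel only makes the same recursion total (inside Pre_ the recursion
-- depth is at most big_part.length + small_part.length + 1, so the fuel is never exhausted).
def startCheatFuel : Nat → List Int → List Int → Int → Int
  | 0, _, _, changes => changes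
  | fuel+1, big_part, small_part, changes =>
    if big_part.sum = small_part.sum then changes
    else
      let changes := changes + 1
      match PySem.List.min? small_part (fun x => x), PySem.List.max? big_part (fun x => x) with
      | some min_number, some max_number =>
        let min_index := (PySem.List.index? small_part min_number).getD 0
        let max_index := (PySem.List.index? big_part max_number).getD 0
        if 9 - min_number > max_number then
          if big_part.sum - small_part.sum > 9 - min_number then
            startCheatFuel fuel (big_part.set max_index 0) small_part changes
          else changes
        else
          if big_part.sum - small_part.sum > max_number then
            startCheatFuel fuel big_part (small_part.set min_index 9) changes
          else changes
      | _, _ => changes   -- min()/max() of an empty list: Python raises ValueError here (outside Pre_)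

def start_cheat (big_part : List Int) (small_part : List Int) (changes : Int) : Int :=
  startCheatFuel (big_part.length + small_part.length + 1) big_part small_part changes

-- ===== PORT B =====
-- Source B's while loop, carrying (diff, count): one change per iteration — a final partial change
-- once diff fits within cap, otherwise a full change of the largest remaining gain.
def altLoop : List Int → Int → Int → Int → Int
  | [], diff, cap, count =>
    if diff = 0 then count
    else if diff ≤ cap then count + 1
    else count               -- gains[i] raises IndexError here in Python (outside Pre_)
  | g :: gs, diff, cap, count =>
    if diff = 0 then count
    else if diff ≤ cap then count + 1
    else altLoop gs (diff - g) cap (count + 1)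

def start_cheat_alt (big_part : List Int) (small_part : List Int) (changes : Int) : Int :=
  let diff := big_part.sum - small_part.sum
  if diff = 0 then changes
  else
    match PySem.List.min? small_part (fun x => x), PySem.List.max? big_part (fun x => x) with
    | some mn, some mx =>
      if 9 - mn > mx then
        altLoop (PySem.List.sorted (big_part.filter (fun x => 0 < x)) (fun x => x) true)
          diff (9 - mn) changes
      else
        altLoop (PySem.List.sorted ((small_part.filter (fun x => x < 9)).map (fun x => 9 - x)) (fun x => x) true)
          diff mx changes
    | _, _ => changes   -- min()/max() of an empty list raises in Source B as well (outside Pre_)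

-- ===== PRECONDITION & SPEC =====
-- Pre_ excludes exactly the inputs on which A raises: a ValueError from min()/max() of an empty
-- list when the sums differ, and a RecursionError when the difference exceeds the total gain
-- available in the branch A commits to, so A recurses forever on an unchanged state.
def Pre_start_cheat (big_part : List Int) (small_part : List Int) (changes : Int) : Prop :=
  big_part.sum = small_part.sum ∨
  (big_part ≠ [] ∧ small_part ≠ [] ∧
    (let mn := (PySem.List.min? small_part (fun x => x)).getD 0
     let mx := (PySem.List.max? big_part (fun x => x)).getD 0
     if 9 - mn > mx then
       big_part.sum - small_part.sum ≤ (9 - mn) + (big_part.filter (fun x => 0 < x)).sum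
     else
       big_part.sum - small_part.sum ≤ mx + ((small_part.filter (fun x => x < 9)).map (fun x => 9 - x)).sum))

instance (big_part : List Int) (small_part : List Int) (changes : Int) : Decidable (Pre_start_cheat big_part small_part changes) := by
  unfold Pre_start_cheat; infer_instance

def pvWitness_start_cheat : List Int × List Int × Int := ([3, 2], [1], 0)

def Spec_start_cheat (big_part : List Int) (small_part : List Int) (changes : Int) (out : Int) : Prop := out = start_cheat_alt big_part small_part changes
instance (big_part : List Int) (small_part : List Int) (changes : Int) (out : Int) : Decidable (Spec_start_cheat big_part small_part changes out) := by unfold Spec_start_cheat; infer_instance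

-- ===== CLAIM (what is proved, stated in full; the proofs are below) =====
def Claim_equal_start_cheat : Prop := ∀ (big_part : List Int) (small_part : List Int) (changes : Int), Dom_start_cheat big_part small_part changes → Pre_start_cheat big_part small_part changes → Spec_start_cheat big_part small_part changes (start_cheat big_part small_part changes)


-- ===== LEMMAS AND PROOFS =====

-- the loop returns its counter unchanged once the difference is closed
lemma altLoop_of_zero (gains : List Int) (diff cap count : Int) (h : diff = 0) :
    altLoop gains diff cap count = count := by
  cases gains <;> simp [altLoop, h]

-- setting position index?(v) of xs to w is, up to permutation, removing one v and prepending w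
lemma set_at_index?_perm (v w : Int) : ∀ (xs : List Int), v ∈ xs →
    (xs.set ((PySem.List.index? xs v).getD 0) w).Perm (w :: xs.erase v) := by
  intro xs
  induction xs with
  | nil => intro h; cases h
  | cons x t ih =>
    intro hmem
    by_cases hx : x = v
    · subst hx
      rw [PySem.List.index?_cons_self]
      simp [List.erase_cons_head]
    · have hvt : v ∈ t := by
        cases hmem with
        | head => exact absurd rfl hx
        | tail _ h => exact h
      obtain ⟨k, hk⟩ := Option.isSome_iff_exists.mp
        ((PySem.List.index?_isSome_iff (xs := t) (v := v)).mpr hvt)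
      rw [PySem.List.index?_cons_of_ne t hx, hk]
      simp only [Option.map_some, Option.getD_some]
      have hset : (x :: t).set (k + 1) w = x :: t.set k w := rfl
      rw [hset]
      have herase : (x :: t).erase v = x :: t.erase v :=
        List.erase_cons_tail (by simpa using hx)
      rw [herase]
      have ih' := ih hvt
      rw [hk] at ih'
      simp only [Option.getD_some] at ih'
      exact (ih'.cons x).trans (List.Perm.swap w x (t.erase v))

-- one return-value fact used in both phases: a nonempty list has a minimum/maximum
lemma min?_exists (xs : List Int) (h : xs ≠ []) :
    ∃ m, PySem.List.min? xs (fun x => x) = some m := by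
  cases hm : PySem.List.min? xs (fun x => x) with
  | none => exact absurd ((PySem.List.min?_eq_none_iff xs (fun x => x)).mp hm) h
  | some m => exact ⟨m, rfl⟩

lemma max?_exists (xs : List Int) (h : xs ≠ []) :
    ∃ m, PySem.List.max? xs (fun x => x) = some m := by
  cases hm : PySem.List.max? xs (fun x => x) with
  | none => exact absurd ((PySem.List.max?_eq_none_iff xs (fun x => x)).mp hm) h
  | some m => exact ⟨m, rfl⟩

-- the small-branch phase: A repeatedly overwrites the minimum of small with 9; B walks the
-- descending list of the remaining positive gains 9 - x
lemma phase_small (mx : Int) :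
    ∀ (gains : List Int) (fuel : Nat) (small big : List Int) (changes : Int),
      gains.length ≤ fuel →
      small ≠ [] →
      PySem.List.max? big (fun x => x) = some mx →
      big.sum - small.sum ≠ 0 →
      gains.Pairwise (fun a b => b ≤ a) →
      ((small.filter (fun x => x < 9)).map (fun x => 9 - x)).Perm gains →
      (∀ x ∈ small, 9 - x ≤ mx) →
      big.sum - small.sum ≤ mx + gains.sum →
      startCheatFuel (fuel+1) big small changes = altLoop gains (big.sum - small.sum) mx changes := by
  intro gains
  induction gains with
  | nil =>
    intro fuel small big changes _ hsne hmax hd0 _ _ hbound hsum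
    obtain ⟨m, hm⟩ := min?_exists small hsne
    have hmmem : m ∈ small := PySem.List.min?_mem hm
    have hne : ¬ (big.sum = small.sum) := fun h => hd0 (by omega)
    have h1 : ¬ (9 - m > mx) := not_lt.mpr (hbound m hmmem)
    simp only [List.sum_nil, add_zero] at hsum
    have h2 : ¬ (big.sum - small.sum > mx) := not_lt.mpr hsum
    simp only [startCheatFuel, altLoop, hm, hmax, if_neg hne]
    rw [if_neg h1, if_neg h2, if_neg hd0, if_pos hsum]
  | cons g gs ih =>
    intro fuel small big changes hlen hsne hmax hd0 hpair hperm hbound hsum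
    obtain ⟨m, hm⟩ := min?_exists small hsne
    have hmmem : m ∈ small := PySem.List.min?_mem hm
    have hmin : ∀ y ∈ small, m ≤ y := by
      intro y hy; exact PySem.List.min?_isMin hm y hy
    have hne : ¬ (big.sum = small.sum) := fun h => hd0 (by omega)
    have hgmem : g ∈ (small.filter (fun x => x < 9)).map (fun x => 9 - x) :=
      hperm.mem_iff.mpr (List.mem_cons_self)
    obtain ⟨x0, hx0f, hx0⟩ := List.mem_map.mp hgmem
    have hx0mem : x0 ∈ small := (List.mem_filter.mp hx0f).1
    have hx0lt : x0 < 9 := by have := (List.mem_filter.mp hx0f).2; simpa using this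
    have hm9 : m < 9 := lt_of_le_of_lt (hmin x0 hx0mem) hx0lt
    have h9mmem : (9 - m) ∈ g :: gs := by
      refine hperm.mem_iff.mp (List.mem_map.mpr ⟨m, List.mem_filter.mpr ⟨hmmem, by simpa using hm9⟩, rfl⟩)
    have hgle : g ≤ 9 - m := by have := hmin x0 hx0mem; omega
    have hge : 9 - m ≤ g := by
      rcases List.mem_cons.mp h9mmem with h | h
      · omega
      · exact (List.pairwise_cons.mp hpair).1 _ h
    have hg : g = 9 - m := le_antisymm hgle hge
    have hgpos : 0 < g := by omega
    have h1 : ¬ (9 - m > mx) := not_lt.mpr (hbound m hmmem)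
    by_cases hstop : big.sum - small.sum ≤ mx
    · have h2 : ¬ (big.sum - small.sum > mx) := not_lt.mpr hstop
      simp only [startCheatFuel, altLoop, hm, hmax, if_neg hne]
      rw [if_neg h1, if_neg h2, if_neg hd0, if_pos hstop]
    · have h2 : big.sum - small.sum > mx := not_le.mp hstop
      obtain ⟨f, rfl⟩ : ∃ f, fuel = f + 1 := by
        cases fuel with
        | zero => simp at hlen
        | succ f => exact ⟨f, rfl⟩
      have hf : gs.length ≤ f := by simpa using hlen
      have hperm' : (small.set ((PySem.List.index? small m).getD 0) 9).Perm (9 :: small.erase m) :=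
        set_at_index?_perm m 9 small hmmem
      set small' := small.set ((PySem.List.index? small m).getD 0) 9 with hs'
      have hperm0 : small.Perm (m :: small.erase m) := List.perm_cons_erase hmmem
      have hsum' : small'.sum = small.sum + (9 - m) := by
        have e1 := hperm'.sum_eq
        have e2 := hperm0.sum_eq
        simp only [List.sum_cons] at e1 e2
        omega
      have hdiff' : big.sum - small'.sum = big.sum - small.sum - g := by omega
      have hsne' : small' ≠ [] := by
        intro h
        have := hperm'.length_eq
        rw [h] at this
        simp at this
      -- the gains of the updated small list are gs, up to permutation
      have pfil : ((small'.filter (fun x => x < 9)).map (fun x => 9 - x)).Perm gs := by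
        have p1 : (small'.filter (fun x => x < 9)).Perm ((small.erase m).filter (fun x => x < 9)) := by
          have := hperm'.filter (fun x => decide (x < 9))
          simpa using this
        have p2 : (small.filter (fun x => x < 9)).Perm (m :: (small.erase m).filter (fun x => x < 9)) := by
          have := hperm0.filter (fun x => decide (x < 9))
          simpa [hm9] using this
        have p3 : ((9 - m) :: ((small.erase m).filter (fun x => x < 9)).map (fun x => 9 - x)).Perm (g :: gs) := by
          have := (p2.map (fun x => (9 : Int) - x)).symm.trans hperm
          simpa using this
        rw [hg] at p3
        exact (p1.map (fun x => (9 : Int) - x)).trans p3.cons_inv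
      have hbound' : ∀ x ∈ small', 9 - x ≤ mx := by
        intro x hx
        rcases List.mem_cons.mp (hperm'.mem_iff.mp hx) with h | h
        · omega
        · exact hbound x (List.mem_of_mem_erase h)
      have hsum'' : big.sum - small'.sum ≤ mx + gs.sum := by
        simp only [List.sum_cons] at hsum
        omega
      -- A takes one step into the recursion
      have hstep : startCheatFuel (f + 1 + 1) big small changes
          = startCheatFuel (f + 1) big small' (changes + 1) := by
        simp only [startCheatFuel, hm, hmax, if_neg hne]
        rw [if_neg h1, if_pos h2]
      -- B's loop spends one full change
      have hrhs : altLoop (g :: gs) (big.sum - small.sum) mx changes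
          = altLoop gs (big.sum - small.sum - g) mx (changes + 1) := by
        simp only [altLoop]
        rw [if_neg hd0, if_neg hstop]
      rw [hstep, hrhs]
      by_cases hz : big.sum - small.sum - g = 0
      · have hzeq : big.sum = small'.sum := by omega
        rw [altLoop_of_zero _ _ _ _ hz]
        simp only [startCheatFuel, if_pos hzeq]
      · have hd0' : big.sum - small'.sum ≠ 0 := by omega
        have := ih f small' big (changes + 1) hf hsne' hmax hd0' (List.Pairwise.of_cons hpair) pfil hbound' hsum''
        rw [this, hdiff']

-- the big-branch phase: A repeatedly overwrites the maximum of big with 0; B walks the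
-- descending list of the remaining positive elements of big
lemma phase_big (mn : Int) :
    ∀ (gains : List Int) (fuel : Nat) (big small : List Int) (changes : Int),
      gains.length ≤ fuel →
      big ≠ [] →
      PySem.List.min? small (fun x => x) = some mn →
      big.sum - small.sum ≠ 0 →
      gains.Pairwise (fun a b => b ≤ a) →
      (big.filter (fun x => 0 < x)).Perm gains →
      (∀ x ∈ big, x < 9 - mn) →
      big.sum - small.sum ≤ (9 - mn) + gains.sum →
      startCheatFuel (fuel+1) big small changes = altLoop gains (big.sum - small.sum) (9 - mn) changes := by
  intro gains
  induction gains with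
  | nil =>
    intro fuel big small changes _ hbne hmin hd0 _ _ hbound hsum
    obtain ⟨M, hM⟩ := max?_exists big hbne
    have hMmem : M ∈ big := PySem.List.max?_mem hM
    have hne : ¬ (big.sum = small.sum) := fun h => hd0 (by omega)
    have h1 : 9 - mn > M := hbound M hMmem
    simp only [List.sum_nil, add_zero] at hsum
    have h2 : ¬ (big.sum - small.sum > 9 - mn) := not_lt.mpr hsum
    simp only [startCheatFuel, altLoop, hmin, hM, if_neg hne]
    rw [if_pos h1, if_neg h2, if_neg hd0, if_pos hsum]
  | cons g gs ih =>
    intro fuel big small changes hlen hbne hmin hd0 hpair hperm hbound hsum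
    obtain ⟨M, hM⟩ := max?_exists big hbne
    have hMmem : M ∈ big := PySem.List.max?_mem hM
    have hMmax : ∀ y ∈ big, y ≤ M := by
      intro y hy; exact PySem.List.max?_isMax hM y hy
    have hne : ¬ (big.sum = small.sum) := fun h => hd0 (by omega)
    have hgmem : g ∈ big.filter (fun x => 0 < x) := hperm.mem_iff.mpr (List.mem_cons_self)
    have hgbig : g ∈ big := (List.mem_filter.mp hgmem).1
    have hgpos : 0 < g := by have := (List.mem_filter.mp hgmem).2; simpa using this
    have hgM : g ≤ M := hMmax g hgbig
    have hMpos : 0 < M := lt_of_lt_of_le hgpos hgM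
    have hMmemg : M ∈ g :: gs :=
      hperm.mem_iff.mp (List.mem_filter.mpr ⟨hMmem, by simpa using hMpos⟩)
    have hMg : M = g := by
      rcases List.mem_cons.mp hMmemg with h | h
      · exact h
      · exact le_antisymm ((List.pairwise_cons.mp hpair).1 _ h) hgM
    subst hMg
    have h1 : 9 - mn > M := hbound M hgbig
    by_cases hstop : big.sum - small.sum ≤ 9 - mn
    · have h2 : ¬ (big.sum - small.sum > 9 - mn) := not_lt.mpr hstop
      simp only [startCheatFuel, altLoop, hmin, hM, if_neg hne]
      rw [if_pos h1, if_neg h2, if_neg hd0, if_pos hstop]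
    · have h2 : big.sum - small.sum > 9 - mn := not_le.mp hstop
      obtain ⟨f, rfl⟩ : ∃ f, fuel = f + 1 := by
        cases fuel with
        | zero => simp at hlen
        | succ f => exact ⟨f, rfl⟩
      have hf : gs.length ≤ f := by simpa using hlen
      have hperm' : (big.set ((PySem.List.index? big M).getD 0) 0).Perm (0 :: big.erase M) :=
        set_at_index?_perm M 0 big hMmem
      set big' := big.set ((PySem.List.index? big M).getD 0) 0 with hb'
      have hperm0 : big.Perm (M :: big.erase M) := List.perm_cons_erase hMmem
      have hsum' : big'.sum = big.sum - M := by
        have e1 := hperm'.sum_eq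
        have e2 := hperm0.sum_eq
        simp only [List.sum_cons] at e1 e2
        omega
      have hdiff' : big'.sum - small.sum = big.sum - small.sum - M := by omega
      have hbne' : big' ≠ [] := by
        intro h
        have := hperm'.length_eq
        rw [h] at this
        simp at this
      have pfil : (big'.filter (fun x => 0 < x)).Perm gs := by
        have p1 : (big'.filter (fun x => 0 < x)).Perm ((big.erase M).filter (fun x => 0 < x)) := by
          have := hperm'.filter (fun x => decide (0 < x))
          simpa using this
        have p2 : (big.filter (fun x => 0 < x)).Perm (M :: (big.erase M).filter (fun x => 0 < x)) := by
          have := hperm0.filter (fun x => decide (0 < x))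
          simpa [hgpos] using this
        have p3 : (M :: (big.erase M).filter (fun x => 0 < x)).Perm (M :: gs) := p2.symm.trans hperm
        exact p1.trans p3.cons_inv
      have hbound' : ∀ x ∈ big', x < 9 - mn := by
        intro x hx
        rcases List.mem_cons.mp (hperm'.mem_iff.mp hx) with h | h
        · omega
        · exact hbound x (List.mem_of_mem_erase h)
      have hsum'' : big'.sum - small.sum ≤ (9 - mn) + gs.sum := by
        simp only [List.sum_cons] at hsum
        omega
      have hstep : startCheatFuel (f + 1 + 1) big small changes
          = startCheatFuel (f + 1) big' small (changes + 1) := by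
        simp only [startCheatFuel, hmin, hM, if_neg hne]
        rw [if_pos h1, if_pos h2]
      have hrhs : altLoop (M :: gs) (big.sum - small.sum) (9 - mn) changes
          = altLoop gs (big.sum - small.sum - M) (9 - mn) (changes + 1) := by
        simp only [altLoop]
        rw [if_neg hd0, if_neg hstop]
      rw [hstep, hrhs]
      by_cases hz : big.sum - small.sum - M = 0
      · have hzeq : big'.sum = small.sum := by omega
        rw [altLoop_of_zero _ _ _ _ hz]
        simp only [startCheatFuel, if_pos hzeq]
      · have hd0' : big'.sum - small.sum ≠ 0 := by omega
        have := ih f big' small (changes + 1) hf hbne' hmin hd0' (List.Pairwise.of_cons hpair) pfil hbound' hsum''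
        rw [this, hdiff']

-- ===== VERDICT (by name: the statement is the Claim_ definition above) =====
theorem start_cheat_spec : Claim_equal_start_cheat := by
  intro big small changes _ hpre
  unfold Spec_start_cheat
  by_cases hd : big.sum - small.sum = 0
  · have he : big.sum = small.sum := by omega
    simp [start_cheat, start_cheat_alt, startCheatFuel, he]
  · have hne : big.sum ≠ small.sum := fun h => hd (by omega)
    rcases hpre with he | ⟨hbne, hsne, hcond⟩
    · exact absurd he hne
    obtain ⟨m, hm⟩ := min?_exists small hsne
    obtain ⟨M, hM⟩ := max?_exists big hbne
    simp only [hm, hM, Option.getD_some] at hcond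
    by_cases hbr : 9 - m > M
    · -- big branch
      rw [if_pos hbr] at hcond
      have hpair : (PySem.List.sorted (big.filter (fun x => 0 < x)) (fun x => x) true).Pairwise
          (fun a b => b ≤ a) := PySem.List.sorted_pairwise_rev _ _
      have hperm : (big.filter (fun x => 0 < x)).Perm
          (PySem.List.sorted (big.filter (fun x => 0 < x)) (fun x => x) true) :=
        (PySem.List.sorted_perm _ _ _).symm
      have hlen : (PySem.List.sorted (big.filter (fun x => 0 < x)) (fun x => x) true).length
          ≤ big.length + small.length := by
        rw [PySem.List.length_sorted]
        have := List.length_filter_le (fun x => decide (0 < x)) big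
        omega
      have hboundx : ∀ x ∈ big, x < 9 - m := by
        intro x hx
        exact lt_of_le_of_lt (PySem.List.max?_isMax hM x hx) hbr
      have hsum : big.sum - small.sum ≤ (9 - m) + (PySem.List.sorted (big.filter (fun x => 0 < x)) (fun x => x) true).sum := by
        rw [← hperm.sum_eq]; exact hcond
      have key := phase_big m _ (big.length + small.length) big small changes hlen hbne hm hd hpair hperm hboundx hsum
      show startCheatFuel (big.length + small.length + 1) big small changes = _
      rw [key]
      simp only [start_cheat_alt, hm, hM, if_neg hd]
      rw [if_pos hbr]
    · -- small branch
      rw [if_neg hbr] at hcond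
      have hpair : (PySem.List.sorted ((small.filter (fun x => x < 9)).map (fun x => 9 - x)) (fun x => x) true).Pairwise
          (fun a b => b ≤ a) := PySem.List.sorted_pairwise_rev _ _
      have hperm : ((small.filter (fun x => x < 9)).map (fun x => 9 - x)).Perm
          (PySem.List.sorted ((small.filter (fun x => x < 9)).map (fun x => 9 - x)) (fun x => x) true) :=
        (PySem.List.sorted_perm _ _ _).symm
      have hlen : (PySem.List.sorted ((small.filter (fun x => x < 9)).map (fun x => 9 - x)) (fun x => x) true).length
          ≤ big.length + small.length := by
        rw [PySem.List.length_sorted, List.length_map]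
        have := List.length_filter_le (fun x => decide (x < 9)) small
        omega
      have hboundx : ∀ x ∈ small, 9 - x ≤ M := by
        intro x hx
        have := PySem.List.min?_isMin hm x hx
        simp only at this
        omega
      have hsum : big.sum - small.sum ≤ M + (PySem.List.sorted ((small.filter (fun x => x < 9)).map (fun x => 9 - x)) (fun x => x) true).sum := by
        rw [← hperm.sum_eq]; exact hcond
      have key := phase_small M _ (big.length + small.length) small big changes hlen hsne hM hd hpair hperm hboundx hsum
      show startCheatFuel (big.length + small.length + 1) big small changes = _
      rw [key]
      simp only [start_cheat_alt, hm, hM, if_neg hd]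
      rw [if_neg hbr]
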